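-- pv_equiv track=rewrite | github.com/bhrdj/el_documents | scripts/04_analysis/utils/markdown_parser.py | _generate_section_id
-- ===== SOURCE A (Python) =====
-- from typing import List, Optional, Tuple
--
-- def _generate_section_id(idx: int, level: int,
--                         prev_headings: List[Tuple[int, int, str]]) -> str:
--     """Generate hierarchical section ID (e.g., '1.2.3')."""
--     # Count sections at each level up to this point
--     level_counts = {i: 0 for i in range(1, 7)}
--
--     for _, prev_level, _ in prev_headings:
--         if prev_level <= level:
--             level_counts[prev_level] += 1
--             # Reset deeper levels when we encounter a higher-level heading
--             if prev_level < level: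
--                 for deeper in range(prev_level + 1, 7):
--                     level_counts[deeper] = 0
--
--     # Build ID from level counts
--     id_parts = []
--     for lvl in range(1, level + 1):
--         id_parts.append(str(level_counts[lvl]))
--
--     return '.'.join(id_parts)
-- ===== SOURCE B (Python) =====
-- from typing import List, Tuple
--
-- def _count_at(lvl: int, levels: List[int]) -> int:
--     """Occurrences of lvl after the last heading at a strictly higher (smaller-numbered) level."""
--     c = 0
--     for p in levels:
--         if p == lvl:
--             c += 1
--         elif p < lvl:
--             c = 0
--     return c
--
-- def _generate_section_id(idx: int, level: int,
--                          prev_headings: List[Tuple[int, int, str]]) -> str: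
--     """Generate hierarchical section ID (e.g., '1.2.3')."""
--     levels = [p for _, p, _ in prev_headings]
--     return '.'.join(str(_count_at(lvl, levels)) for lvl in range(1, level + 1))
-- ===== Notes on version B (the rewrite author's own statement) =====
-- stated objective: simpler
-- what changed: Drops A's level_counts dict and its deeper-level reset loops entirely: B computes each of the level components independently with a tiny per-level scan (count occurrences, reset to 0 on any smaller level), since a heading at a smaller level is exactly what zeroes A's counter for that level.
import Mathlib
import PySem

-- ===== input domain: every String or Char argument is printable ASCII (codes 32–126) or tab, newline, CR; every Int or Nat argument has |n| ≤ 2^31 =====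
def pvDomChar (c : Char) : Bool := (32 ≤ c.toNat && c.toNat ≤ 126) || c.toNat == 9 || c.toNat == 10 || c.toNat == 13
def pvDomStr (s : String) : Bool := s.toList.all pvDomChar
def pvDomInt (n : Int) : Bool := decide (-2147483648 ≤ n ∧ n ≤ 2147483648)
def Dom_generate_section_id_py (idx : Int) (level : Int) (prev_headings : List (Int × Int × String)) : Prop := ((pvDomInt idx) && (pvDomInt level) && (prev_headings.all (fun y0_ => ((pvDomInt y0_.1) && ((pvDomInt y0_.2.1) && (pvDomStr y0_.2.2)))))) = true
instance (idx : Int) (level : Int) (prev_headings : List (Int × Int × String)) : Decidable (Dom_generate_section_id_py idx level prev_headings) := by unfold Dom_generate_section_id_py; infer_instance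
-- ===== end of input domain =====

-- B drops A's level_counts dict and its deeper-level reset loops: each of the 'level'
-- components is computed independently by a tiny scan (objective: simpler, same cost class).

-- ===== PORT A =====
def generate_section_id_py (idx : Int) (level : Int) (prev_headings : List (Int × Int × String)) : String :=
  -- level_counts = {i: 0 for i in range(1, 7)}
  let level_counts : PySem.Dict Int Int :=
    (PySem.List.pyRange 1 7 1).foldl (fun d i => d.insert i 0) PySem.Dict.empty
  -- forward loop: increment, then reset deeper levels (dict access exact under Pre_)
  let level_counts := prev_headings.foldl (fun d p =>
      if p.2.1 ≤ level then
        let d1 := d.insert p.2.1 (d.getD p.2.1 0 + 1)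
        if p.2.1 < level then
          (PySem.List.pyRange (p.2.1 + 1) 7 1).foldl (fun d k => d.insert k 0) d1
        else d1
      else d) level_counts
  -- id_parts = [str(level_counts[lvl]) for lvl in range(1, level+1)]
  PySem.Str.join "." ((PySem.List.pyRange 1 (level + 1) 1).map
    (fun lvl => PySem.Int.toStr (level_counts.getD lvl 0)))

-- ===== PORT B =====
-- _count_at(lvl, levels): count occurrences of lvl, reset to 0 on any smaller level
def pvCountAt (lvl : Int) (levels : List Int) : Int :=
  levels.foldl (fun c p => if p = lvl then c + 1 else if p < lvl then 0 else c) 0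

def generate_section_id_py_alt (idx : Int) (level : Int) (prev_headings : List (Int × Int × String)) : String :=
  let levels := prev_headings.map (fun p => p.2.1)
  PySem.Str.join "." ((PySem.List.pyRange 1 (level + 1) 1).map
    (fun lvl => PySem.Int.toStr (pvCountAt lvl levels)))

-- ===== PRECONDITION & SPEC =====
-- Pre_ excludes exactly the inputs where Python A raises KeyError: level ≥ 7 (the build loop
-- reads level_counts[7]) and any heading with prev_level ≤ level but prev_level outside 1..6.
def Pre_generate_section_id_py (idx : Int) (level : Int) (prev_headings : List (Int × Int × String)) : Prop :=
  level ≤ 6 ∧ ∀ p ∈ prev_headings, p.2.1 ≤ level → 1 ≤ p.2.1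

instance (idx : Int) (level : Int) (prev_headings : List (Int × Int × String)) : Decidable (Pre_generate_section_id_py idx level prev_headings) := by unfold Pre_generate_section_id_py; infer_instance

def pvWitness_generate_section_id_py : Int × Int × (List (Int × Int × String)) :=
  (0, 3, [(0, 1, "a"), (1, 2, "b"), (2, 2, "c"), (3, 3, "d")])

def Spec_generate_section_id_py (idx : Int) (level : Int) (prev_headings : List (Int × Int × String)) (out : String) : Prop := out = generate_section_id_py_alt idx level prev_headings
instance (idx : Int) (level : Int) (prev_headings : List (Int × Int × String)) (out : String) : Decidable (Spec_generate_section_id_py idx level prev_headings out) := by unfold Spec_generate_section_id_py; infer_instance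

-- ===== CLAIM (what is proved, stated in full; the proofs are below) =====
def Claim_equal_generate_section_id_py : Prop := ∀ (idx : Int) (level : Int) (prev_headings : List (Int × Int × String)), Dom_generate_section_id_py idx level prev_headings → Pre_generate_section_id_py idx level prev_headings → Spec_generate_section_id_py idx level prev_headings (generate_section_id_py idx level prev_headings)

-- ===== LEMMAS AND PROOFS =====

lemma pv_getD_foldl_insert_zero (ks : List Int) (d : PySem.Dict Int Int) (l : Int) :
    (ks.foldl (fun d k => d.insert k (0 : Int)) d).getD l 0
      = if l ∈ ks then 0 else d.getD l 0 := by
  induction ks generalizing d with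
  | nil => simp
  | cons k ks ih =>
    simp only [List.foldl_cons, ih, PySem.Dict.getD_insert, List.mem_cons]
    by_cases h1 : l ∈ ks <;> by_cases h2 : l = k <;> simp [h1, h2]

-- the count A's loop keeps at a fixed level l equals B's per-level scan over the same entries
lemma pvA_loop (level l : Int) (h1 : 1 ≤ l) (h2 : l ≤ level) (h3 : level ≤ 6)
    (xs : List (Int × Int × String)) (d : PySem.Dict Int Int) :
    (xs.foldl (fun d p =>
        if p.2.1 ≤ level then
          let d1 := d.insert p.2.1 (d.getD p.2.1 0 + 1)
          if p.2.1 < level then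
            (PySem.List.pyRange (p.2.1 + 1) 7 1).foldl (fun d k => d.insert k 0) d1
          else d1
        else d) d).getD l 0
      = xs.foldl (fun c p => if p.2.1 = l then c + 1 else if p.2.1 < l then 0 else c)
          (d.getD l 0) := by
  induction xs generalizing d with
  | nil => rfl
  | cons x xs ih =>
    simp only [List.foldl_cons]
    rw [ih]
    congr 1
    by_cases hle : x.2.1 ≤ level
    · by_cases hlt : x.2.1 < level
      · simp only [hle, hlt, if_pos]
        rw [pv_getD_foldl_insert_zero]
        simp only [PySem.List.mem_pyRange_one, PySem.Dict.getD_insert]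
        by_cases hxl : x.2.1 = l
        · have : ¬ (x.2.1 + 1 ≤ l ∧ l < 7) := by omega
          simp [hxl]
        · by_cases hlt2 : x.2.1 < l
          · have : x.2.1 + 1 ≤ l ∧ l < 7 := by omega
            simp [hxl, hlt2, this]
          · have h4 : ¬ (x.2.1 + 1 ≤ l ∧ l < 7) := by omega
            have h5 : l ≠ x.2.1 := fun h => hxl h.symm
            simp [hxl, hlt2, h5]
      · by_cases hxl : x.2.1 = l
        · subst hxl
          simp [hle, hlt]
        · have h5 : l ≠ x.2.1 := fun h => hxl h.symm
          have h6 : ¬ x.2.1 < l := by omega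
          simp [hle, hlt, hxl, h6, PySem.Dict.getD_insert, h5]
    · have hne : x.2.1 ≠ l := by omega
      have h6 : ¬ x.2.1 < l := by omega
      simp [hle, hne, h6]

-- ===== VERDICT (by name: the statement is the Claim_ definition above) =====
theorem generate_section_id_py_spec : Claim_equal_generate_section_id_py := by
  intro idx level prev_headings _ hpre
  obtain ⟨hlev, -⟩ := hpre
  unfold Spec_generate_section_id_py generate_section_id_py generate_section_id_py_alt
  refine congrArg (PySem.Str.join ".") (List.map_congr_left ?_)
  intro l hl
  rw [PySem.List.mem_pyRange_one] at hl
  congr 1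
  rw [pvA_loop level l hl.1 (by omega) hlev, pv_getD_foldl_insert_zero]
  have hmem : l ∈ PySem.List.pyRange 1 7 1 := by rw [PySem.List.mem_pyRange_one]; omega
  rw [if_pos hmem, pvCountAt, List.foldl_map]
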